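-- pv_equiv track=rewrite | github.com/loicata/WardSOAR | packages/wardsoar-pc/src/wardsoar/pc/installer_helpers.py | _extract_signer_short_name
-- ===== SOURCE A (Python) =====
-- def _extract_signer_short_name(subject: str) -> str:
--     """Pull the ``CN=`` / ``O=`` short name from a certificate subject string.
--
--     Subjects look like ``CN=Insecure.Com LLC, O=Insecure.Com LLC,
--     L=City, S=State, C=US``. We return the first ``CN=`` value;
--     falling back to ``O=`` or the trimmed raw subject when the
--     regular parsing fails.
--     """
--     if not subject:
--         return ""
--     for key in ("CN=", "O="):
--         for chunk in subject.split(","):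
--             chunk = chunk.strip()
--             if chunk.startswith(key):
--                 return chunk[len(key) :].strip('"')
--     return subject[:64]
-- ===== SOURCE B (Python) =====
-- def _extract_signer_short_name(subject: str) -> str:
--     if not subject:
--         return ""
--     cn = o = None
--     for chunk in subject.split(","):
--         key, sep, value = chunk.strip().partition("=")
--         if not sep:
--             continue
--         if key == "CN" and cn is None:
--             cn = value.strip('"')
--         elif key == "O" and o is None:
--             o = value.strip('"')
--     if cn is not None:
--         return cn
--     if o is not None:
--         return o
--     return subject[:64]
-- ===== Notes on version B (the rewrite author's own statement) =====
-- stated objective: alternative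
-- what changed: A scans the comma-separated chunks once per key (CN first, then O) with startswith tests; B makes a single pass that partitions each chunk at its first equals sign and records the first CN and O values in two accumulators, then picks CN over O.
import Mathlib
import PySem

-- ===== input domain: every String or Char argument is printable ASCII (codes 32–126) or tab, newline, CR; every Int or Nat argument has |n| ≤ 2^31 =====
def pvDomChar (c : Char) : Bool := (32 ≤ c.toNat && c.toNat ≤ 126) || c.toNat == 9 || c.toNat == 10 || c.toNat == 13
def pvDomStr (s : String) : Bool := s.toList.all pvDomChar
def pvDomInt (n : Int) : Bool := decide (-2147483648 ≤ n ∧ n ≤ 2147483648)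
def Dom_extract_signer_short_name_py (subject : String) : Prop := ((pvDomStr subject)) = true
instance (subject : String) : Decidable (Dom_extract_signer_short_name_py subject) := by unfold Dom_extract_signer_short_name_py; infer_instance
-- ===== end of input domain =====

-- B replaces A's two startswith-scans over the chunk list by ONE fold that records the first CN= and O= values (return value only; no side effects).


-- ===== PORT A =====
-- A's inner 'for chunk in subject.split(","): …' loop, for one key; returns the first match
def aScan (key : String) : List String → Option String
  | [] => none
  | c :: rest =>
    let c' := PySem.Str.strip c
    if PySem.Str.startswith c' key then
      some (PySem.Str.stripChars (PySem.Str.slice c' (some (PySem.Str.len key)) none) "\"")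
    else aScan key rest

def extract_signer_short_name_py (subject : String) : String :=
  if subject = "" then ""                               -- if not subject: return ""
  else
    -- subject.split(","): the separator is the nonempty literal ",", so split? cannot be none
    let chunks := (PySem.Str.split? subject ",").getD []
    match aScan "CN=" chunks with                        -- for key in ("CN=", "O="): first pass
    | some v => v
    | none =>
      match aScan "O=" chunks with                       -- second pass
      | some v => v
      | none => PySem.Str.slice subject none (some 64)   -- return subject[:64]

-- ===== PORT B =====
-- Python str.partition("=") ported by hand (exact on all strings): split at the FIRST '=':
-- key = chars before it, sep found iff the dropWhile part is nonempty, value = its tail.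
def partEq (cs : List Char) : List Char × List Char :=
  (cs.takeWhile (fun c => c ≠ '='), cs.dropWhile (fun c => c ≠ '='))

-- one iteration of B's single loop: state = (cn, o), first occurrence of each key wins
def bStep (st : Option String × Option String) (c : String) : Option String × Option String :=
  let p := partEq (PySem.Str.strip c).toList
  if p.2 = [] then st                                    -- if not sep: continue
  else if p.1 = "CN".toList ∧ st.1 = none then
    (some (PySem.Str.stripChars (String.ofList p.2.tail) "\""), st.2)
  else if p.1 = "O".toList ∧ st.2 = none then
    (st.1, some (PySem.Str.stripChars (String.ofList p.2.tail) "\""))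
  else st

def extract_signer_short_name_py_alt (subject : String) : String :=
  if subject = "" then ""
  else
    let st := ((PySem.Str.split? subject ",").getD []).foldl bStep (none, none)
    match st.1 with
    | some v => v
    | none =>
      match st.2 with
      | some v => v
      | none => PySem.Str.slice subject none (some 64)

-- ===== PRECONDITION & SPEC =====
def Spec_extract_signer_short_name_py (subject : String) (out : String) : Prop := out = extract_signer_short_name_py_alt subject
instance (subject : String) (out : String) : Decidable (Spec_extract_signer_short_name_py subject out) := by unfold Spec_extract_signer_short_name_py; infer_instance

-- ===== CLAIM (what is proved, stated in full; the proofs are below) =====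
def Claim_equal_extract_signer_short_name_py : Prop := ∀ (subject : String), Dom_extract_signer_short_name_py subject → Spec_extract_signer_short_name_py subject (extract_signer_short_name_py subject)

-- ===== LEMMAS AND PROOFS =====

-- a chunk (as chars) starts with k ++ "=" iff partition-at-'=' yields key k and found a '='
theorem startswith_iff_partEq (cs k : List Char) (hk : '=' ∉ k) :
    PySem.Chars.startswith cs (k ++ ['=']) = true ↔
      ((partEq cs).1 = k ∧ (partEq cs).2 ≠ []) := by
  have hall : ∀ x ∈ k, ¬ x = '=' := fun x hx he => hk (he ▸ hx)
  rw [PySem.Chars.startswith_iff]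
  constructor
  · rintro ⟨rest, hcs⟩
    have hcs' : cs = k ++ '='::rest := by simpa using hcs.symm
    subst hcs'
    refine ⟨?_, ?_⟩
    · simp only [partEq, List.takeWhile_append]
      simp
      intro _
      exact hall
    · simp only [partEq, List.dropWhile_append]
      simp
      rw [if_pos hall]
      simp
  · rintro ⟨h1, h2⟩
    simp only [partEq] at h1 h2
    cases hdw : List.dropWhile (fun c => c ≠ '=') cs with
    | nil => exact absurd hdw h2
    | cons c t =>
      have hd := List.head_dropWhile_not (fun c => c ≠ '=') (l := cs) h2
      simp only [hdw, List.head_cons] at hd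
      simp at hd
      have hcs : cs = k ++ '=' :: t := by
        conv_lhs => rw [← List.takeWhile_append_dropWhile (p := fun c => c ≠ '=') (l := cs)]
        rw [h1, hdw, hd]
      exact ⟨t, by rw [hcs]; simp⟩

-- when the key matches, the partition value is exactly the tail slice A takes
theorem partEq_tail (cs k : List Char) (hk : '=' ∉ k)
    (h : PySem.Chars.startswith cs (k ++ ['=']) = true) :
    (partEq cs).2.tail = cs.drop (k.length + 1) := by
  have hall : ∀ x ∈ k, ¬ x = '=' := fun x hx he => hk (he ▸ hx)
  obtain ⟨rest, hcs⟩ := (PySem.Chars.startswith_iff _ _).mp h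
  have hcs' : cs = k ++ '='::rest := by simpa using hcs.symm
  subst hcs'
  simp only [partEq, List.dropWhile_append]
  simp
  rw [if_pos hall]
  simp

-- the two concrete keys, at char level (the form simp_all normalises to)
theorem swCN (cs : List Char) :
    PySem.Chars.startswith cs ['C','N','='] = true ↔
      ((partEq cs).1 = ['C','N'] ∧ (partEq cs).2 ≠ []) := by
  rw [show (['C','N','='] : List Char) = ['C','N'] ++ ['='] from rfl]
  exact startswith_iff_partEq _ _ (by decide)

theorem swO (cs : List Char) :
    PySem.Chars.startswith cs ['O','='] = true ↔
      ((partEq cs).1 = ['O'] ∧ (partEq cs).2 ≠ []) := by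
  rw [show (['O','='] : List Char) = ['O'] ++ ['='] from rfl]
  exact startswith_iff_partEq _ _ (by decide)

-- B's per-chunk step, seen through its effect on each component
theorem bStep_fst (st : Option String × Option String) (c : String) :
    (bStep st c).1 =
      if PySem.Str.startswith (PySem.Str.strip c) "CN=" = true ∧ st.1 = none then
        some (PySem.Str.stripChars (String.ofList (partEq (PySem.Str.strip c).toList).2.tail) "\"")
      else st.1 := by
  simp only [bStep]
  split_ifs <;> simp_all [swCN]

theorem bStep_snd (st : Option String × Option String) (c : String) :
    (bStep st c).2 =
      if PySem.Str.startswith (PySem.Str.strip c) "O=" = true ∧ st.2 = none then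
        some (PySem.Str.stripChars (String.ofList (partEq (PySem.Str.strip c).toList).2.tail) "\"")
      else st.2 := by
  simp only [bStep]
  split_ifs <;> simp_all [swO]

-- B's per-chunk value equals A's per-chunk value (as Strings), when the key matches
theorem value_eq (c' : String) (key : String) (k : List Char) (hkey : key.toList = k ++ ['='])
    (hk : '=' ∉ k) (h : PySem.Chars.startswith c'.toList (k ++ ['=']) = true) :
    PySem.Str.stripChars (String.ofList (partEq c'.toList).2.tail) "\"" =
      PySem.Str.stripChars (PySem.Str.slice c' (some (PySem.Str.len key)) none) "\"" := by
  refine String.toList_inj.mp ?_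
  rw [PySem.Str.toList_stripChars, PySem.Str.toList_stripChars, String.toList_ofList,
      PySem.Str.toList_slice]
  congr 1
  rw [partEq_tail _ _ hk h]
  have hlen : PySem.Str.len key = ((k.length + 1 : Nat) : Int) := by
    rw [PySem.Str.len_eq, hkey]; simp
  rw [hlen, PySem.Chars.slice_eq_listSlice, PySem.List.slice_from_natCast]

-- the fold's first component is exactly A's CN= scan (once set, it never changes)
theorem foldl_fst (chunks : List String) : ∀ st : Option String × Option String,
    (chunks.foldl bStep st).1 =
      match st.1 with | some v => some v | none => aScan "CN=" chunks := by
  induction chunks with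
  | nil => intro st; cases h : st.1 <;> simp [aScan, h]
  | cons c rest ih =>
    intro st
    rw [List.foldl_cons, ih]
    by_cases hs : PySem.Str.startswith (PySem.Str.strip c) "CN=" = true
    · cases h1 : st.1 with
      | none =>
        rw [bStep_fst, if_pos ⟨hs, h1⟩]
        have hs' : PySem.Chars.startswith (PySem.Str.strip c).toList ("CN".toList ++ ['=']) = true := by
          rw [show ("CN".toList ++ ['='] : List Char) = "CN=".toList from rfl,
              ← PySem.Str.startswith_eq]
          exact hs
        show some _ = aScan "CN=" (c :: rest)
        simp only [aScan]
        rw [if_pos hs]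
        exact congrArg some (value_eq _ "CN=" "CN".toList rfl (by decide) hs')
      | some v =>
        rw [bStep_fst, if_neg (by rw [h1]; rintro ⟨-, h⟩; exact Option.some_ne_none v h), h1]
    · rw [bStep_fst, if_neg (fun h => hs h.1)]
      cases h1 : st.1 with
      | some v => rfl
      | none =>
        show aScan "CN=" rest = aScan "CN=" (c :: rest)
        conv_rhs => simp only [aScan]
        rw [if_neg hs]

-- the fold's second component is exactly A's O= scan
theorem foldl_snd (chunks : List String) : ∀ st : Option String × Option String,
    (chunks.foldl bStep st).2 =
      match st.2 with | some v => some v | none => aScan "O=" chunks := by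
  induction chunks with
  | nil => intro st; cases h : st.2 <;> simp [aScan, h]
  | cons c rest ih =>
    intro st
    rw [List.foldl_cons, ih]
    by_cases hs : PySem.Str.startswith (PySem.Str.strip c) "O=" = true
    · cases h1 : st.2 with
      | none =>
        rw [bStep_snd, if_pos ⟨hs, h1⟩]
        have hs' : PySem.Chars.startswith (PySem.Str.strip c).toList ("O".toList ++ ['=']) = true := by
          rw [show ("O".toList ++ ['='] : List Char) = "O=".toList from rfl,
              ← PySem.Str.startswith_eq]
          exact hs
        show some _ = aScan "O=" (c :: rest)
        simp only [aScan]
        rw [if_pos hs]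
        exact congrArg some (value_eq _ "O=" "O".toList rfl (by decide) hs')
      | some v =>
        rw [bStep_snd, if_neg (by rw [h1]; rintro ⟨-, h⟩; exact Option.some_ne_none v h), h1]
    · rw [bStep_snd, if_neg (fun h => hs h.1)]
      cases h1 : st.2 with
      | some v => rfl
      | none =>
        show aScan "O=" rest = aScan "O=" (c :: rest)
        conv_rhs => simp only [aScan]
        rw [if_neg hs]

-- ===== VERDICT (by name: the statement is the Claim_ definition above) =====
theorem extract_signer_short_name_py_spec : Claim_equal_extract_signer_short_name_py := by
  intro subject _
  unfold Spec_extract_signer_short_name_py extract_signer_short_name_py extract_signer_short_name_py_alt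
  by_cases hs : subject = ""
  · simp [hs]
  · simp only [if_neg hs]
    rw [foldl_fst, foldl_snd]
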